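-- pv_equiv track=rewrite | github.com/ZYQIO/agent_team_demo | skills/agent-team-runtime/scripts/lead_console.py | describe_pending_teammate_reviews
-- ===== SOURCE A (Python) =====
-- from typing import Any, Dict, List
--
-- def describe_pending_teammate_reviews(snapshot: Dict[str, Any]) -> List[str]:
--     pending_requests = [
--         item
--         for item in snapshot.get("plan_approval_requests", [])
--         if isinstance(item, dict) and str(item.get("status", "") or "") == "pending"
--     ]
--     if not pending_requests:
--         return ["pending_teammate_reviews=none"]
--     grouped: Dict[str, List[Dict[str, Any]]] = {}
--     for item in pending_requests:
--         agent_name = str(item.get("requested_by", "") or "")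
--         if not agent_name:
--             continue
--         grouped.setdefault(agent_name, []).append(item)
--     if not grouped:
--         return ["pending_teammate_reviews=none"]
--     lines = [
--         "pending_teammate_reviews="
--         + ",".join(
--             f"{agent_name}:{len(grouped.get(agent_name, []))}"
--             for agent_name in sorted(grouped.keys())
--         )
--     ]
--     for agent_name in sorted(grouped.keys()):
--         task_ids = [
--             str(item.get("task_id", "") or "")
--             for item in grouped.get(agent_name, [])
--             if str(item.get("task_id", "") or "")
--         ]
--         lines.append(
--             f"pending_teammate={agent_name} task_ids={','.join(task_ids) or 'none'} "
--             f"next=review teammate {agent_name} | approve teammate {agent_name} | reject teammate {agent_name}"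
--         )
--     return lines
-- ===== SOURCE B (Python) =====
-- from typing import Any, Dict, List
--
-- def describe_pending_teammate_reviews(snapshot: Dict[str, Any]) -> List[str]:
--     # One filtering pass keeps only pending requests that name a requester;
--     # groups come from the sorted set of agent names with a per-agent scan
--     # (no intermediate dict of lists).
--     named = [
--         item
--         for item in snapshot.get("plan_approval_requests", [])
--         if isinstance(item, dict)
--         and str(item.get("status", "") or "") == "pending"
--         and str(item.get("requested_by", "") or "")
--     ]
--     if not named:
--         return ["pending_teammate_reviews=none"]
--     agents = sorted({str(item.get("requested_by", "") or "") for item in named})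
--     summary = ",".join(
--         f"{a}:{sum(1 for item in named if str(item.get('requested_by', '') or '') == a)}"
--         for a in agents
--     )
--     lines = ["pending_teammate_reviews=" + summary]
--     for a in agents:
--         ids = ",".join(
--             tid
--             for item in named
--             if str(item.get("requested_by", "") or "") == a
--             for tid in (str(item.get("task_id", "") or ""),)
--             if tid
--         ) or "none"
--         lines.append(
--             f"pending_teammate={a} task_ids={ids} "
--             f"next=review teammate {a} | approve teammate {a} | reject teammate {a}"
--         )
--     return lines
-- ===== Notes on version B (the rewrite author's own statement) =====
-- stated objective: alternative
-- what changed: Replaces A's dict-of-lists grouping (setdefault/append then two sorted(keys) passes) by a single filter keeping pending requests with a named requester, a sorted set of agent names, and a per-agent scan that derives count and task ids directly, merging A's two 'none' early returns into one.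
import Mathlib
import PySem

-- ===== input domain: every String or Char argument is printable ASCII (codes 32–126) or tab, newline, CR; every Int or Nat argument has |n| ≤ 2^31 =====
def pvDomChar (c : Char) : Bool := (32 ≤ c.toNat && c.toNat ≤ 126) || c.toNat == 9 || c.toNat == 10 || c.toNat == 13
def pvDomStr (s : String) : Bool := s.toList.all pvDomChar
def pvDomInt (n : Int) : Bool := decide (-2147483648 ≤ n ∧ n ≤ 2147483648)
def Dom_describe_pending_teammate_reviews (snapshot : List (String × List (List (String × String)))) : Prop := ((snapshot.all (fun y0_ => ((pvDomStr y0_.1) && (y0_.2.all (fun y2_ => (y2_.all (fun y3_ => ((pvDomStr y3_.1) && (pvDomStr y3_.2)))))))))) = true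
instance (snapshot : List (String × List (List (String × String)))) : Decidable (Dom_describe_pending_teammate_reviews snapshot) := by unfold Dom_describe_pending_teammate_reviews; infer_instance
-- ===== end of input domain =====

-- B replaces A's dict-of-lists grouping and double sorted(keys) pass by one filter,
-- a sorted set of agent names and a per-agent scan (alternative decomposition, same results).


-- ===== PORT A =====
-- str(item.get(key, "") or ""): with default "" the value is a string, so `or ""` maps "" to "" and
-- keeps everything else — ported literally as the if below.
def pvGetStrA (item : List (String × String)) (key : String) : String :=
  let v := (PySem.Dict.mk item).getD key ""
  if v = "" then "" else v

def describe_pending_teammate_reviews (snapshot : List (String × List (List (String × String)))) : List String :=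
  -- isinstance(item, dict) is always true under the declared type
  let pending := ((PySem.Dict.mk snapshot).getD "plan_approval_requests" []).filter
      (fun item => pvGetStrA item "status" == "pending")
  if pending = [] then ["pending_teammate_reviews=none"]
  else
    let grouped : PySem.Dict String (List (List (String × String))) :=
      pending.foldl (fun g item =>
        let agent := pvGetStrA item "requested_by"
        if agent = "" then g
        else g.modify agent [] (fun xs => xs ++ [item])) PySem.Dict.empty
    if grouped.keys = [] then ["pending_teammate_reviews=none"]
    else
      let skeys := PySem.List.sorted grouped.keys (fun k => k) false
      ("pending_teammate_reviews=" ++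
        PySem.Str.join "," (skeys.map (fun a =>
          a ++ ":" ++ PySem.Int.toStr ((grouped.getD a []).length : Int)))) ::
      skeys.map (fun a =>
        let task_ids := ((grouped.getD a []).map (fun item => pvGetStrA item "task_id")).filter
            (fun t => t ≠ "")
        let ids := PySem.Str.join "," task_ids
        "pending_teammate=" ++ a ++ " task_ids=" ++ (if ids = "" then "none" else ids) ++
        " next=review teammate " ++ a ++ " | approve teammate " ++ a ++ " | reject teammate " ++ a)

-- ===== PORT B =====
def pvAgentB (item : List (String × String)) : String := (PySem.Dict.mk item).getD "requested_by" ""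

def describe_pending_teammate_reviews_alt (snapshot : List (String × List (List (String × String)))) : List String :=
  let named := ((PySem.Dict.mk snapshot).getD "plan_approval_requests" []).filter
      (fun item => ((PySem.Dict.mk item).getD "status" "" == "pending") && (pvAgentB item != ""))
  if named = [] then ["pending_teammate_reviews=none"]
  else
    let agents := PySem.List.sorted (PySem.Set.ofList (named.map pvAgentB)) (fun a => a) false
    let summary := PySem.Str.join "," (agents.map (fun a =>
        a ++ ":" ++ PySem.Int.toStr (((named.filter (fun item => pvAgentB item == a)).length : Int))))
    ("pending_teammate_reviews=" ++ summary) ::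
    agents.map (fun a =>
      let ids := PySem.Str.join ","
        (((named.filter (fun item => pvAgentB item == a)).map
            (fun item => (PySem.Dict.mk item).getD "task_id" "")).filter (fun t => t ≠ ""))
      "pending_teammate=" ++ a ++ " task_ids=" ++ (if ids = "" then "none" else ids) ++
      " next=review teammate " ++ a ++ " | approve teammate " ++ a ++ " | reject teammate " ++ a)

-- ===== PRECONDITION & SPEC =====
def Spec_describe_pending_teammate_reviews (snapshot : List (String × List (List (String × String)))) (out : List String) : Prop := out = describe_pending_teammate_reviews_alt snapshot
instance (snapshot : List (String × List (List (String × String)))) (out : List String) : Decidable (Spec_describe_pending_teammate_reviews snapshot out) := by unfold Spec_describe_pending_teammate_reviews; infer_instance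

-- ===== CLAIM (what is proved, stated in full; the proofs are below) =====
def Claim_equal_describe_pending_teammate_reviews : Prop := ∀ (snapshot : List (String × List (List (String × String)))), Dom_describe_pending_teammate_reviews snapshot → Spec_describe_pending_teammate_reviews snapshot (describe_pending_teammate_reviews snapshot)

-- ===== LEMMAS AND PROOFS =====

theorem pvGetStrA_eq (item : List (String × String)) (key : String) :
    pvGetStrA item key = (PySem.Dict.mk item).getD key "" := by
  unfold pvGetStrA
  by_cases h : (PySem.Dict.mk item).getD key "" = "" <;> simp [h]

-- A's grouping loop skips items with empty agent: it is the plain grouping fold over the filtered list.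
theorem foldl_skip (l : List (List (String × String)))
    (g : PySem.Dict String (List (List (String × String)))) :
    l.foldl (fun g item =>
        if (PySem.Dict.mk item).getD "requested_by" "" = "" then g
        else g.modify ((PySem.Dict.mk item).getD "requested_by" "") [] (fun xs => xs ++ [item])) g
      = (l.filter (fun item => (PySem.Dict.mk item).getD "requested_by" "" != "")).foldl
          (fun g item => g.modify ((PySem.Dict.mk item).getD "requested_by" "") [] (fun xs => xs ++ [item])) g := by
  induction l generalizing g with
  | nil => rfl
  | cons hd tl ih =>
    by_cases h : (PySem.Dict.mk hd).getD "requested_by" "" = "" <;>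
      simp [h, List.foldl_cons, ih]

-- The grouping fold read at key a is just the sublist of items whose agent is a.
theorem getD_groupFold (named : List (List (String × String))) (a : String) :
    (named.foldl (fun g item =>
        g.modify ((PySem.Dict.mk item).getD "requested_by" "") [] (fun xs => xs ++ [item]))
        PySem.Dict.empty).getD a []
      = named.filter (fun item => (PySem.Dict.mk item).getD "requested_by" "" == a) := by
  have h := PySem.Dict.getD_foldl_modify_append
      (l := named.map (fun item => ((PySem.Dict.mk item).getD "requested_by" "", item)))
      (d := (PySem.Dict.empty : PySem.Dict String (List (List (String × String))))) (c := a)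
  rw [List.foldl_map] at h
  rw [h, List.filter_map]
  simp [Function.comp_def]

-- The grouping fold's keys are the agent names, first occurrences in order (= Python set/dict order).
theorem keys_groupFold (named : List (List (String × String))) :
    (named.foldl (fun g item =>
        g.modify ((PySem.Dict.mk item).getD "requested_by" "") [] (fun xs => xs ++ [item]))
        PySem.Dict.empty).keys
      = PySem.Set.ofList (named.map (fun item => (PySem.Dict.mk item).getD "requested_by" "")) := by
  have h := PySem.Dict.keys_foldl_modify_key
      (l := named) (key := fun item => (PySem.Dict.mk item).getD "requested_by" "") (d0 := [])
      (f := fun (_ : PySem.Dict String (List (List (String × String))))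
              (item : List (String × String)) => (fun xs => xs ++ [item]))
      (d := PySem.Dict.empty)
  simpa [PySem.Set.update_nil_left] using h

-- B's single filter is A's status filter followed by the named-agent filter.
theorem pvAgentB_def : pvAgentB = fun item => (PySem.Dict.mk item).getD "requested_by" "" := rfl

theorem filter_split (full : List (List (String × String))) :
    full.filter (fun item =>
        ((PySem.Dict.mk item).getD "status" "" == "pending")
          && ((PySem.Dict.mk item).getD "requested_by" "" != ""))
      = (full.filter (fun item => (PySem.Dict.mk item).getD "status" "" == "pending")).filter
          (fun item => (PySem.Dict.mk item).getD "requested_by" "" != "") := by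
  rw [List.filter_filter]
  apply List.filter_congr
  intro x _
  rw [Bool.and_comm]

theorem set_ofList_ne_nil {α : Type} [BEq α] [LawfulBEq α] (x : α) (xs : List α) :
    PySem.Set.ofList (x :: xs) ≠ [] := by
  intro h
  have hm : x ∈ PySem.Set.ofList (x :: xs) := by
    rw [PySem.Set.mem_ofList]; exact List.mem_cons_self
  rw [h] at hm
  simp at hm

-- ===== VERDICT (by name: the statement is the Claim_ definition above) =====
theorem describe_pending_teammate_reviews_spec : Claim_equal_describe_pending_teammate_reviews := by
  intro snapshot _
  unfold Spec_describe_pending_teammate_reviews describe_pending_teammate_reviews describe_pending_teammate_reviews_alt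
  simp only [pvGetStrA_eq, pvAgentB_def, foldl_skip, getD_groupFold, keys_groupFold, filter_split]
  set full := (PySem.Dict.mk snapshot).getD "plan_approval_requests" [] with hfull
  set pending := full.filter (fun item => (PySem.Dict.mk item).getD "status" "" == "pending") with hp
  set named := pending.filter (fun item => (PySem.Dict.mk item).getD "requested_by" "" != "") with hn
  by_cases hpe : pending = []
  · have hne : named = [] := by rw [hn, hpe]; rfl
    simp [hpe, hne]
  · by_cases hne : named = []
    · simp [hpe, hne]
    · obtain ⟨x, xs, hx⟩ := List.exists_cons_of_ne_nil hne
      have hk : PySem.Set.ofList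
          (named.map (fun item => (PySem.Dict.mk item).getD "requested_by" "")) ≠ [] := by
        rw [hx]; exact set_ofList_ne_nil _ _
      simp [hpe, hne, hk]
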